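-- pv_equiv track=rewrite | github.com/ivanidknow/hexvibe | scripts/render_skill_indexes.py | threats_by_stack
-- ===== SOURCE A (Python) =====
-- def threats_by_stack(rows: list[tuple[str, str, str]]) -> list[str]:
--     grouped: dict[str, list[tuple[str, str]]] = {}
--     for tid, title, stack in rows:
--         s = (stack or "Generic").strip()
--         grouped.setdefault(s, []).append((tid, title))
--     out: list[str] = []
--     for stack, items in sorted(grouped.items(), key=lambda kv: (-len(kv[1]), kv[0].lower())):
--         sample = ", ".join(f"`{tid}`" for tid, _ in items[:4])
--         out.append(f"**{stack}**: {len(items)} metrics ({sample})")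
--     return out
-- ===== SOURCE B (Python) =====
-- def threats_by_stack(rows: list[tuple[str, str, str]]) -> list[str]:
--     keys = [(stack or "Generic").strip() for _, _, stack in rows]
--     groups = [
--         (k, [(tid, title) for (tid, title, _), kk in zip(rows, keys) if kk == k])
--         for k in dict.fromkeys(keys)
--     ]
--     groups.sort(key=lambda kv: (-len(kv[1]), kv[0].lower()))
--     return [
--         "**{}**: {} metrics ({})".format(
--             k, len(items), ", ".join(f"`{tid}`" for tid, _ in items[:4])
--         )
--         for k, items in groups
--     ]
-- ===== Notes on version B (the rewrite author's own statement) =====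
-- stated objective: alternative
-- what changed: Replaced the mutable-dict setdefault/append grouping pass with a dict-free pipeline: compute the stripped keys once, take their ordered dedup (dict.fromkeys), and build each group by a per-key filtering comprehension over the rows, then sort and format as before.
import Mathlib
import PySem

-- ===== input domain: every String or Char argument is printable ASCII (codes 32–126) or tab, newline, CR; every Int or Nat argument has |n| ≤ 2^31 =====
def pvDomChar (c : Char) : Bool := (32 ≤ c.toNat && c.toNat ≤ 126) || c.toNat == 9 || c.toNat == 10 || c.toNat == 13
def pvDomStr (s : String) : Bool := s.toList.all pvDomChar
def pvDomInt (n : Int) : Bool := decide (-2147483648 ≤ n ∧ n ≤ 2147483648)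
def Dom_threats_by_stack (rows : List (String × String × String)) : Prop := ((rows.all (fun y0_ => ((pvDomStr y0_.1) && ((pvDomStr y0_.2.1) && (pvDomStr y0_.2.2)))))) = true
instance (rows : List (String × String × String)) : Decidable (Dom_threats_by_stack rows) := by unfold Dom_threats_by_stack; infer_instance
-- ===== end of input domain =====

-- B replaces A's setdefault/append dict grouping by an ordered dedup of the stripped
-- keys with one filtering comprehension per key (objective: alternative decomposition).

-- shared by both ports (the identical Python fragments): the group key of a row,
-- and the summary line for one (key, items) group
def pvKey (r : String × String × String) : String :=
  PySem.Str.strip (if r.2.2 = "" then "Generic" else r.2.2)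

def pvFmt (kv : String × List (String × String)) : String :=
  let sample := PySem.Str.join ", " ((kv.2.take 4).map (fun it => "`" ++ it.1 ++ "`"))
  "**" ++ kv.1 ++ "**: " ++ PySem.Int.toStr (kv.2.length : Int) ++ " metrics (" ++ sample ++ ")"

-- ===== PORT A =====
def threats_by_stack (rows : List (String × String × String)) : List String :=
  (PySem.List.sorted2
      ((rows.foldl (fun d r => d.modify (pvKey r) [] (fun l => l ++ [(r.1, r.2.1)]))
          PySem.Dict.empty).items)
      (fun kv => -(kv.2.length : Int)) (fun kv => PySem.Str.lower kv.1) false).map pvFmt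

-- ===== PORT B =====
def threats_by_stack_alt (rows : List (String × String × String)) : List String :=
  (PySem.List.sorted2
      ((PySem.List.dedup (rows.map pvKey)).map (fun k =>
        (k, ((rows.zip (rows.map pvKey)).filter (fun rk => rk.2 == k)).map
              (fun rk => (rk.1.1, rk.1.2.1)))))
      (fun kv => -(kv.2.length : Int)) (fun kv => PySem.Str.lower kv.1) false).map pvFmt

-- ===== PRECONDITION & SPEC =====
def Spec_threats_by_stack (rows : List (String × String × String)) (out : List String) : Prop := out = threats_by_stack_alt rows
instance (rows : List (String × String × String)) (out : List String) : Decidable (Spec_threats_by_stack rows out) := by unfold Spec_threats_by_stack; infer_instance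

-- ===== CLAIM (what is proved, stated in full; the proofs are below) =====
def Claim_equal_threats_by_stack : Prop := ∀ (rows : List (String × String × String)), Dom_threats_by_stack rows → Spec_threats_by_stack rows (threats_by_stack rows)

-- ===== LEMMAS AND PROOFS =====

-- zip-with-own-keys filter/map collapses to a plain filter over the rows
theorem pv_zip_filter (rows : List (String × String × String)) (k : String) :
    ((rows.zip (rows.map pvKey)).filter (fun rk => rk.2 == k)).map (fun rk => (rk.1.1, rk.1.2.1))
      = (rows.filter (fun r => pvKey r == k)).map (fun r => (r.1, r.2.1)) := by
  induction rows with
  | nil => rfl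
  | cons r rs ih =>
      simp only [List.map_cons, List.zip_cons_cons, List.filter_cons]
      by_cases h : pvKey r == k
      · simp [h, ih]
      · simp [h, ih]

-- a dict with Nodup keys is its key list paired with the stored values
theorem pv_items_eq_keys_map {ν : Type} (d : PySem.Dict String ν) (d0 : ν)
    (h : d.keys.Nodup) : d.items = d.keys.map (fun k => (k, d.getD k d0)) := by
  have hk : d.keys = d.items.map (fun p => p.1) := by simp [PySem.Dict.keys]
  rw [hk, List.map_map]
  conv_lhs => rw [← List.map_id d.items]
  apply List.map_congr_left
  intro p hp
  have h1 : (p.1, p.2) ∈ d.items := by simpa using hp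
  have h2 := PySem.Dict.getD_of_mem_items d h1 h d0
  simp [h2]

-- the grouping fold of port A produces exactly port B's dedup-and-filter group list
theorem pv_grouped_items (rows : List (String × String × String)) :
    (rows.foldl (fun d r => d.modify (pvKey r) [] (fun l => l ++ [(r.1, r.2.1)])) PySem.Dict.empty).items
      = (PySem.List.dedup (rows.map pvKey)).map (fun k =>
          (k, ((rows.zip (rows.map pvKey)).filter (fun rk => rk.2 == k)).map (fun rk => (rk.1.1, rk.1.2.1)))) := by
  set d := rows.foldl (fun d r => d.modify (pvKey r) [] (fun l => l ++ [(r.1, r.2.1)])) PySem.Dict.empty with hd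
  have hkeys : d.keys = PySem.Set.ofList (rows.map pvKey) := by
    rw [hd, PySem.Dict.keys_foldl_modify_key rows pvKey [] (fun d r l => l ++ [(r.1, r.2.1)]) PySem.Dict.empty]
    simpa [PySem.Dict.keys] using PySem.Set.update_empty (rows.map pvKey)
  have hnodup : d.keys.Nodup := by rw [hkeys]; exact PySem.Set.nodup_ofList _
  have hgetD : ∀ k, d.getD k [] =
      ((rows.map (fun r => (pvKey r, (r.1, r.2.1)))).filter (fun p => p.1 == k)).map (fun p => p.2) := by
    intro k
    have h3 := PySem.Dict.getD_foldl_modify_append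
      (rows.map (fun r => (pvKey r, (r.1, r.2.1)))) PySem.Dict.empty k
    simp only [List.foldl_map] at h3
    rw [hd]
    simpa using h3
  rw [pv_items_eq_keys_map d [] hnodup, hkeys, PySem.List.dedup_eq_ofList]
  apply List.map_congr_left
  intro k _
  rw [hgetD k, pv_zip_filter]
  simp [List.filter_map, Function.comp_def]

-- ===== VERDICT (by name: the statement is the Claim_ definition above) =====
theorem threats_by_stack_spec : Claim_equal_threats_by_stack := by
  intro rows _
  unfold Spec_threats_by_stack threats_by_stack threats_by_stack_alt
  rw [pv_grouped_items]
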